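-- pv_equiv track=rewrite | github.com/max4210/jenkins-test | scripts/cml_export.py | split_cli_blocks
-- ===== SOURCE A (Python) =====
-- def split_cli_blocks(config_text):
--     """Split IOS-XE config into a list of (command, [child_lines]) tuples.
--
--     A new block starts at every line that begins at column 0 and is not
--     a comment (!) or blank.
--     """
--     blocks = []
--     current_cmd = None
--     current_children = []
--
--     for line in config_text.splitlines():
--         stripped = line.rstrip()
--         if not stripped or stripped.startswith("!"):
--             continue
--         if not line[0].isspace():
--             if current_cmd is not None:
--                 blocks.append((current_cmd, current_children))
--             current_cmd = stripped
--             current_children = []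
--         else:
--             current_children.append(stripped.strip())
--
--     if current_cmd is not None:
--         blocks.append((current_cmd, current_children))
--
--     return blocks
-- ===== SOURCE B (Python) =====
-- def _split_leading(entries):
--     """Split off the leading run of non-top (child) entries."""
--     k = 0
--     while k < len(entries) and not entries[k][1]:
--         k += 1
--     return entries[:k], entries[k:]
--
--
-- def split_cli_blocks(config_text):
--     """Split IOS-XE config into a list of (command, [child_lines]) tuples.
--
--     Two phases: first filter the surviving lines into (rstripped text,
--     is_top) entries, then group the entry list by its top-level boundaries.
--     """
--     entries = []
--     for line in config_text.splitlines():
--         text = line.rstrip()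
--         if text and not text.startswith("!"):
--             entries.append((text, not line[0].isspace()))
--     _, entries = _split_leading(entries)
--     blocks = []
--     while entries:
--         head, rest = entries[0], entries[1:]
--         kids, entries = _split_leading(rest)
--         blocks.append((head[0], [t.strip() for t, _ in kids]))
--     return blocks
-- ===== Notes on version B (the rewrite author's own statement) =====
-- stated objective: alternative
-- what changed: Replaced A's single stateful pass (current_cmd/current_children accumulator with a final flush) by a two-phase decomposition: filter lines into (rstripped text, is_top) entries, then group the entry list at its top-level boundaries with a split-leading-children helper.
import Mathlib
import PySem

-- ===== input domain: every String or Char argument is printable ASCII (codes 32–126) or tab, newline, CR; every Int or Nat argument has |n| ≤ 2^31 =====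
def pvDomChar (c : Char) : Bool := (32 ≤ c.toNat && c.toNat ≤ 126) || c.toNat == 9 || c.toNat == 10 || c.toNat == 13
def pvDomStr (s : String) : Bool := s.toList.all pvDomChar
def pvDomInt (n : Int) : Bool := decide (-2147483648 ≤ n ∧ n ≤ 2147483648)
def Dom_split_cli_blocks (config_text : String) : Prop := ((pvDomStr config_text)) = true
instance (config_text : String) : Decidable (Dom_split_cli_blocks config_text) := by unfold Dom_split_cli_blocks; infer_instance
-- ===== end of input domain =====

-- B replaces A's one-pass accumulator loop by filter-entries-then-group-at-boundaries (alternative decomposition, same cost).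

-- ===== PORT A =====
-- one step of A's for-loop over (blocks, current_cmd, current_children)
def pvStepA (st : List (String × List String) × Option String × List String) (line : String) :
    List (String × List String) × Option String × List String :=
  let stripped := PySem.Str.rstrip line
  if stripped == "" || PySem.Str.startswith stripped "!" then st
  else if !(match PySem.Str.pyGet? line 0 with | some c => PySem.Chars.isspace c | none => false) then
    ((match st.2.1 with | some c => st.1 ++ [(c, st.2.2)] | none => st.1), some stripped, [])
  else
    (st.1, st.2.1, st.2.2 ++ [PySem.Str.strip stripped])

def split_cli_blocks (config_text : String) : List (String × List String) :=
  let r := (PySem.Str.splitlines config_text).foldl pvStepA ([], none, [])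
  match r.2.1 with
  | some c => r.1 ++ [(c, r.2.2)]
  | none => r.1

-- ===== PORT B =====
-- the surviving entry of one line: (rstripped text, is_top), none if skipped
def pvEntryB (line : String) : Option (String × Bool) :=
  let text := PySem.Str.rstrip line
  if text == "" || PySem.Str.startswith text "!" then none
  else some (text, !(match PySem.Str.pyGet? line 0 with | some c => PySem.Chars.isspace c | none => false))

-- port of _split_leading: split off the leading run of non-top entries
def pvSplitLeadB : List (String × Bool) → List (String × Bool) × List (String × Bool)
  | [] => ([], [])
  | e :: rest =>
    if e.2 then ([], e :: rest)
    else
      let p := pvSplitLeadB rest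
      (e :: p.1, p.2)

theorem pvSplitLeadB_snd_length : ∀ l : List (String × Bool), (pvSplitLeadB l).2.length ≤ l.length
  | [] => Nat.le_refl _
  | e :: rest => by
    simp only [pvSplitLeadB]
    split
    · simp
    · exact Nat.le_succ_of_le (pvSplitLeadB_snd_length rest)

-- port of B's while loop over the entry list
def pvGroupB : List (String × Bool) → List (String × List String)
  | [] => []
  | e :: rest =>
    (e.1, ((pvSplitLeadB rest).1).map (fun p => PySem.Str.strip p.1)) :: pvGroupB (pvSplitLeadB rest).2
termination_by l => l.length
decreasing_by
  exact Nat.lt_succ_of_le (pvSplitLeadB_snd_length rest)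

def split_cli_blocks_alt (config_text : String) : List (String × List String) :=
  let entries := (PySem.Str.splitlines config_text).filterMap pvEntryB
  pvGroupB (pvSplitLeadB entries).2

-- ===== PRECONDITION & SPEC =====
def Spec_split_cli_blocks (config_text : String) (out : List (String × List String)) : Prop := out = split_cli_blocks_alt config_text
instance (config_text : String) (out : List (String × List String)) : Decidable (Spec_split_cli_blocks config_text out) := by unfold Spec_split_cli_blocks; infer_instance

-- ===== CLAIM (what is proved, stated in full; the proofs are below) =====
def Claim_equal_split_cli_blocks : Prop := ∀ (config_text : String), Dom_split_cli_blocks config_text → Spec_split_cli_blocks config_text (split_cli_blocks config_text)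

-- ===== LEMMAS AND PROOFS =====

-- A's final flush of the loop state
def pvFinishA (st : List (String × List String) × Option String × List String) : List (String × List String) :=
  match st.2.1 with
  | some c => st.1 ++ [(c, st.2.2)]
  | none => st.1

theorem pvFoldA_some : ∀ (lines : List String) (blocks : List (String × List String)) (cmd : String) (ch : List String),
    pvFinishA (lines.foldl pvStepA (blocks, some cmd, ch))
      = blocks ++ (cmd, ch ++ ((pvSplitLeadB (lines.filterMap pvEntryB)).1).map (fun p => PySem.Str.strip p.1))
          :: pvGroupB (pvSplitLeadB (lines.filterMap pvEntryB)).2 := by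
  intro lines
  induction lines with
  | nil => intro blocks cmd ch; simp [pvFinishA, pvSplitLeadB, pvGroupB]
  | cons l lines ih =>
    intro blocks cmd ch
    simp only [List.foldl_cons, List.filterMap_cons]
    by_cases hskip : (PySem.Str.rstrip l == "" || PySem.Str.startswith (PySem.Str.rstrip l) "!") = true
    · have he : pvEntryB l = none := by
        simp only [pvEntryB]; rw [if_pos hskip]
      have hs : pvStepA (blocks, some cmd, ch) l = (blocks, some cmd, ch) := by
        simp only [pvStepA]; rw [if_pos hskip]
      rw [he, hs]
      exact ih blocks cmd ch
    · by_cases htop : (match PySem.Str.pyGet? l 0 with | some c => PySem.Chars.isspace c | none => false) = true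
      · -- child line
        have he : pvEntryB l = some (PySem.Str.rstrip l, false) := by
          simp only [pvEntryB]; rw [if_neg hskip, htop]; rfl
        have hs : pvStepA (blocks, some cmd, ch) l
            = (blocks, some cmd, ch ++ [PySem.Str.strip (PySem.Str.rstrip l)]) := by
          simp only [pvStepA]; rw [if_neg hskip, htop]; rfl
        rw [he, hs, ih blocks cmd (ch ++ [PySem.Str.strip (PySem.Str.rstrip l)])]
        simp [pvSplitLeadB]
      · -- top-level line
        have htop' : (match PySem.Str.pyGet? l 0 with | some c => PySem.Chars.isspace c | none => false) = false := by
          simpa using htop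
        have he : pvEntryB l = some (PySem.Str.rstrip l, true) := by
          simp only [pvEntryB]; rw [if_neg hskip, htop']; rfl
        have hs : pvStepA (blocks, some cmd, ch) l
            = (blocks ++ [(cmd, ch)], some (PySem.Str.rstrip l), []) := by
          simp only [pvStepA]; rw [if_neg hskip, htop']; rfl
        rw [he, hs, ih (blocks ++ [(cmd, ch)]) (PySem.Str.rstrip l) []]
        simp [pvSplitLeadB, pvGroupB]

theorem pvFoldA_none : ∀ (lines : List String) (blocks : List (String × List String)) (ch : List String),
    pvFinishA (lines.foldl pvStepA (blocks, none, ch))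
      = blocks ++ pvGroupB (pvSplitLeadB (lines.filterMap pvEntryB)).2 := by
  intro lines
  induction lines with
  | nil => intro blocks ch; simp [pvFinishA, pvSplitLeadB, pvGroupB]
  | cons l lines ih =>
    intro blocks ch
    simp only [List.foldl_cons, List.filterMap_cons]
    by_cases hskip : (PySem.Str.rstrip l == "" || PySem.Str.startswith (PySem.Str.rstrip l) "!") = true
    · have he : pvEntryB l = none := by
        simp only [pvEntryB]; rw [if_pos hskip]
      have hs : pvStepA (blocks, none, ch) l = (blocks, none, ch) := by
        simp only [pvStepA]; rw [if_pos hskip]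
      rw [he, hs]
      exact ih blocks ch
    · by_cases htop : (match PySem.Str.pyGet? l 0 with | some c => PySem.Chars.isspace c | none => false) = true
      · have he : pvEntryB l = some (PySem.Str.rstrip l, false) := by
          simp only [pvEntryB]; rw [if_neg hskip, htop]; rfl
        have hs : pvStepA (blocks, none, ch) l
            = (blocks, none, ch ++ [PySem.Str.strip (PySem.Str.rstrip l)]) := by
          simp only [pvStepA]; rw [if_neg hskip, htop]; rfl
        rw [he, hs]
        rw [ih blocks (ch ++ [PySem.Str.strip (PySem.Str.rstrip l)])]
        simp [pvSplitLeadB]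
      · have htop' : (match PySem.Str.pyGet? l 0 with | some c => PySem.Chars.isspace c | none => false) = false := by
          simpa using htop
        have he : pvEntryB l = some (PySem.Str.rstrip l, true) := by
          simp only [pvEntryB]; rw [if_neg hskip, htop']; rfl
        have hs : pvStepA (blocks, none, ch) l
            = (blocks, some (PySem.Str.rstrip l), []) := by
          simp only [pvStepA]; rw [if_neg hskip, htop']; rfl
        rw [he, hs, pvFoldA_some lines blocks (PySem.Str.rstrip l) []]
        simp [pvSplitLeadB, pvGroupB]

-- ===== VERDICT (by name: the statement is the Claim_ definition above) =====
theorem split_cli_blocks_spec : Claim_equal_split_cli_blocks := by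
  intro config_text _
  unfold Spec_split_cli_blocks split_cli_blocks split_cli_blocks_alt
  have h := pvFoldA_none (PySem.Str.splitlines config_text) [] []
  simpa [pvFinishA] using h
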